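-- pv_equiv track=rewrite | github.com/DEFRA/ai-eu-trade-accelerator | judit/packages/pipeline/src/judit_pipeline/extraction_repair.py | classify_repairable_failure_type
-- ===== SOURCE A (Python) =====
-- _REPAIRABLE_SUBSTRINGS: tuple[str, ...] = (
--     "insufficient credit",
--     "credit balance",
--     "not enough credit",
--     "quota",
--     "rate limit",
--     "ratelimit",
--     "429",
--     "context window",
--     "context_window",
--     "max token",
--     "token limit",
--     "model alias",
--     "unknown model",
--     "model not found",
--     "json parse",
--     "jsondecode",
--     "model call or json parse failed",
--     "model call failed",
--     "llm call failure",
--     "llm invocation",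
--     "overloaded",
--     "api error",
-- )
--
-- def classify_repairable_failure_type(message: str) -> str | None:
--     """Return coarse category when *message* suggests a retryable model/infra failure."""
--     blob = message.lower()
--     if not blob.strip():
--         return None
--     if "insufficient credit" in blob or "credit balance" in blob or "not enough credit" in blob:
--         return "insufficient_credits"
--     if "quota" in blob:
--         return "quota"
--     if "rate limit" in blob or "ratelimit" in blob or "429" in blob:
--         return "rate_limit"
--     if "context window" in blob or "context_window" in blob:
--         return "context_window"
--     if "model alias" in blob or "unknown model" in blob or "model not found" in blob:
--         return "model_availability"
--     if "json parse" in blob or "jsondecode" in blob or "model call or json parse failed" in blob: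
--         return "json_parse_or_llm_failure"
--     if (
--         "model call failed" in blob
--         or "llm call failure" in blob
--         or "llm invocation" in blob
--         or "api error" in blob
--         or "overloaded" in blob
--     ):
--         return "llm_call_failure"
--     for sub in _REPAIRABLE_SUBSTRINGS:
--         if sub in blob:
--             return "other_model_infra"
--     return None
-- ===== SOURCE B (Python) =====
-- # Each pattern gets a distinct priority rank (mirroring the original check order)
-- # and a category; the classifier is a min-reduction over ALL matching patterns.
-- _PATTERN_PRIORITY = {
--     "insufficient credit": (0, "insufficient_credits"),
--     "credit balance": (1, "insufficient_credits"),
--     "not enough credit": (2, "insufficient_credits"),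
--     "quota": (3, "quota"),
--     "rate limit": (4, "rate_limit"),
--     "ratelimit": (5, "rate_limit"),
--     "429": (6, "rate_limit"),
--     "context window": (7, "context_window"),
--     "context_window": (8, "context_window"),
--     "model alias": (9, "model_availability"),
--     "unknown model": (10, "model_availability"),
--     "model not found": (11, "model_availability"),
--     "json parse": (12, "json_parse_or_llm_failure"),
--     "jsondecode": (13, "json_parse_or_llm_failure"),
--     "model call or json parse failed": (14, "json_parse_or_llm_failure"),
--     "model call failed": (15, "llm_call_failure"),
--     "llm call failure": (16, "llm_call_failure"),
--     "llm invocation": (17, "llm_call_failure"),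
--     "api error": (18, "llm_call_failure"),
--     "overloaded": (19, "llm_call_failure"),
--     "max token": (20, "other_model_infra"),
--     "token limit": (21, "other_model_infra"),
-- }
--
-- def classify_repairable_failure_type(message: str) -> str | None:
--     """Return coarse category when *message* suggests a retryable model/infra failure."""
--     blob = message.lower()
--     if not blob.strip():
--         return None
--     best = min((prio for pat, prio in _PATTERN_PRIORITY.items() if pat in blob),
--                default=None)
--     return None if best is None else best[1]
-- ===== Notes on version B (the rewrite author's own statement) =====
-- stated objective: alternative
-- what changed: Replaces A's first-match if-cascade plus trailing catch-all scan by a min-reduction: every pattern carries a distinct priority rank and a category, and the result is the category of the minimum-rank pattern occurring in the message (no early return, no branch cascade).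
import Mathlib
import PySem

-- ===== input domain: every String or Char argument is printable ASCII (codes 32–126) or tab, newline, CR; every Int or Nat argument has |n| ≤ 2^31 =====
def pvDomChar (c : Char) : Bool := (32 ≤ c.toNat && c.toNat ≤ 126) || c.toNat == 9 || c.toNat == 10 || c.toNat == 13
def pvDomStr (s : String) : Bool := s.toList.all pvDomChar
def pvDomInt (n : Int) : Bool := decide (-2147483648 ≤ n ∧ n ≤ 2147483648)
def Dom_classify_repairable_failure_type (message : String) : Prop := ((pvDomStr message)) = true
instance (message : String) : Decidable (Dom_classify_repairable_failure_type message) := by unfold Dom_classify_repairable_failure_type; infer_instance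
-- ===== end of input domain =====

-- B replaces A's first-match if-cascade (plus trailing catch-all scan) by a min-reduction:
-- every pattern carries a distinct priority rank, and the answer is the category of the
-- minimum-rank matching pattern (alternative decomposition, same cost).

-- ===== PORT A =====
def pvRepairableSubstrings : List String :=
  ["insufficient credit", "credit balance", "not enough credit", "quota", "rate limit",
   "ratelimit", "429", "context window", "context_window", "max token", "token limit",
   "model alias", "unknown model", "model not found", "json parse", "jsondecode",
   "model call or json parse failed", "model call failed", "llm call failure",
   "llm invocation", "overloaded", "api error"]

-- the trailing `for sub in _REPAIRABLE_SUBSTRINGS` loop of A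
def pvALoop (subs : List String) (blob : String) : Option String :=
  match subs with
  | [] => none
  | s :: rest => if PySem.Str.isIn s blob then some "other_model_infra" else pvALoop rest blob

def classify_repairable_failure_type (message : String) : Option String :=
  let blob := PySem.Str.lower message
  if PySem.Str.strip blob = "" then none
  else if PySem.Str.isIn "insufficient credit" blob || PySem.Str.isIn "credit balance" blob || PySem.Str.isIn "not enough credit" blob then
    some "insufficient_credits"
  else if PySem.Str.isIn "quota" blob then some "quota"
  else if PySem.Str.isIn "rate limit" blob || PySem.Str.isIn "ratelimit" blob || PySem.Str.isIn "429" blob then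
    some "rate_limit"
  else if PySem.Str.isIn "context window" blob || PySem.Str.isIn "context_window" blob then
    some "context_window"
  else if PySem.Str.isIn "model alias" blob || PySem.Str.isIn "unknown model" blob || PySem.Str.isIn "model not found" blob then
    some "model_availability"
  else if PySem.Str.isIn "json parse" blob || PySem.Str.isIn "jsondecode" blob || PySem.Str.isIn "model call or json parse failed" blob then
    some "json_parse_or_llm_failure"
  else if PySem.Str.isIn "model call failed" blob || PySem.Str.isIn "llm call failure" blob || PySem.Str.isIn "llm invocation" blob || PySem.Str.isIn "api error" blob || PySem.Str.isIn "overloaded" blob then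
    some "llm_call_failure"
  else pvALoop pvRepairableSubstrings blob

-- ===== PORT B =====
-- _PATTERN_PRIORITY as an association list (insertion order)
def pvPatternPriority : List (String × Nat × String) :=
  [("insufficient credit", 0, "insufficient_credits"),
   ("credit balance", 1, "insufficient_credits"),
   ("not enough credit", 2, "insufficient_credits"),
   ("quota", 3, "quota"),
   ("rate limit", 4, "rate_limit"),
   ("ratelimit", 5, "rate_limit"),
   ("429", 6, "rate_limit"),
   ("context window", 7, "context_window"),
   ("context_window", 8, "context_window"),
   ("model alias", 9, "model_availability"),
   ("unknown model", 10, "model_availability"),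
   ("model not found", 11, "model_availability"),
   ("json parse", 12, "json_parse_or_llm_failure"),
   ("jsondecode", 13, "json_parse_or_llm_failure"),
   ("model call or json parse failed", 14, "json_parse_or_llm_failure"),
   ("model call failed", 15, "llm_call_failure"),
   ("llm call failure", 16, "llm_call_failure"),
   ("llm invocation", 17, "llm_call_failure"),
   ("api error", 18, "llm_call_failure"),
   ("overloaded", 19, "llm_call_failure"),
   ("max token", 20, "other_model_infra"),
   ("token limit", 21, "other_model_infra")]

-- Python's min(... generator of (rank, cat) tuples ..., default=None): keep the lexicographically
-- smallest (rank, category) pair among matching patterns (ranks are distinct, so rank decides)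
def pvMinLoop (items : List (String × Nat × String)) (blob : String)
    (best : Option (Nat × String)) : Option (Nat × String) :=
  match items with
  | [] => best
  | (p, r, c) :: rest =>
      if PySem.Str.isIn p blob then
        match best with
        | none => pvMinLoop rest blob (some (r, c))
        | some b =>
            if r < b.1 ∨ (r = b.1 ∧ c < b.2) then pvMinLoop rest blob (some (r, c))
            else pvMinLoop rest blob (some b)
      else pvMinLoop rest blob best

def classify_repairable_failure_type_alt (message : String) : Option String :=
  let blob := PySem.Str.lower message
  if PySem.Str.strip blob = "" then none
  else
    match pvMinLoop pvPatternPriority blob none with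
    | none => none
    | some b => some b.2

-- ===== PRECONDITION & SPEC =====
def Spec_classify_repairable_failure_type (message : String) (out : Option String) : Prop := out = classify_repairable_failure_type_alt message
instance (message : String) (out : Option String) : Decidable (Spec_classify_repairable_failure_type message out) := by unfold Spec_classify_repairable_failure_type; infer_instance

-- ===== CLAIM (what is proved, stated in full; the proofs are below) =====
def Claim_equal_classify_repairable_failure_type : Prop := ∀ (message : String), Dom_classify_repairable_failure_type message → Spec_classify_repairable_failure_type message (classify_repairable_failure_type message)

-- ===== LEMMAS AND PROOFS =====
-- first-match characterisation of the min-loop (ranks strictly increase along the table)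
def pvFirst (items : List (String × Nat × String)) (blob : String) : Option (Nat × String) :=
  match items with
  | [] => none
  | (p, r, c) :: rest => if PySem.Str.isIn p blob then some (r, c) else pvFirst rest blob

theorem pvMinLoop_keep (items : List (String × Nat × String)) (blob : String)
    (b : Nat × String) (h : ∀ x ∈ items, b.1 < x.2.1) :
    pvMinLoop items blob (some b) = some b := by
  induction items with
  | nil => rfl
  | cons x rest ih =>
      obtain ⟨p, r, c⟩ := x
      have hr : b.1 < r := h _ (List.mem_cons_self ..)
      have hrest : ∀ x ∈ rest, b.1 < x.2.1 := fun x hx => h x (List.mem_cons_of_mem _ hx)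
      simp only [pvMinLoop]
      by_cases hin : PySem.Str.isIn p blob = true
      · simp only [hin, if_pos]
        have : ¬ (r < b.1 ∨ (r = b.1 ∧ c < b.2)) := by
          rintro (h1 | ⟨h2, _⟩) <;> omega
        rw [if_neg this, ih hrest]
      · simp only [hin]
        exact ih hrest

theorem pvMinLoop_first (items : List (String × Nat × String)) (blob : String)
    (h : items.Pairwise (fun a b => a.2.1 < b.2.1)) :
    pvMinLoop items blob none = pvFirst items blob := by
  induction items with
  | nil => rfl
  | cons x rest ih =>
      obtain ⟨p, r, c⟩ := x
      rw [List.pairwise_cons] at h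
      simp only [pvMinLoop, pvFirst]
      by_cases hin : PySem.Str.isIn p blob = true
      · simp only [hin, if_pos]
        exact pvMinLoop_keep rest blob (r, c) h.1
      · simp only [hin]
        exact ih h.2

-- (if (a || b) then x else y) splits into two single-atom ifs
theorem pv_ite_or {α : Type} (a b : Bool) (x y : α) :
    (if (a || b) = true then x else y) = if a = true then x else if b = true then x else y := by
  cases a <;> simp

-- ===== VERDICT (by name: the statement is the Claim_ definition above) =====
set_option maxHeartbeats 2000000 in
theorem classify_repairable_failure_type_spec : Claim_equal_classify_repairable_failure_type := by
  intro message _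
  unfold Spec_classify_repairable_failure_type classify_repairable_failure_type classify_repairable_failure_type_alt
  set blob := PySem.Str.lower message with hb
  by_cases hs : PySem.Str.strip blob = ""
  · simp only [hs, reduceIte]
  · simp only [if_neg hs]
    rw [pvMinLoop_first pvPatternPriority blob (by decide)]
    simp only [pvFirst, pvPatternPriority, pvALoop, pvRepairableSubstrings, Bool.or_assoc, pv_ite_or]
    cases h0 : PySem.Str.isIn "insufficient credit" blob <;> simp only [if_true, if_false, Bool.false_eq_true]
    cases h1 : PySem.Str.isIn "credit balance" blob <;> simp only [if_true, if_false, Bool.false_eq_true]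
    cases h2 : PySem.Str.isIn "not enough credit" blob <;> simp only [if_true, if_false, Bool.false_eq_true]
    cases h3 : PySem.Str.isIn "quota" blob <;> simp only [if_true, if_false, Bool.false_eq_true]
    cases h4 : PySem.Str.isIn "rate limit" blob <;> simp only [if_true, if_false, Bool.false_eq_true]
    cases h5 : PySem.Str.isIn "ratelimit" blob <;> simp only [if_true, if_false, Bool.false_eq_true]
    cases h6 : PySem.Str.isIn "429" blob <;> simp only [if_true, if_false, Bool.false_eq_true]
    cases h7 : PySem.Str.isIn "context window" blob <;> simp only [if_true, if_false, Bool.false_eq_true]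
    cases h8 : PySem.Str.isIn "context_window" blob <;> simp only [if_true, if_false, Bool.false_eq_true]
    cases h9 : PySem.Str.isIn "model alias" blob <;> simp only [if_true, if_false, Bool.false_eq_true]
    cases h10 : PySem.Str.isIn "unknown model" blob <;> simp only [if_true, if_false, Bool.false_eq_true]
    cases h11 : PySem.Str.isIn "model not found" blob <;> simp only [if_true, if_false, Bool.false_eq_true]
    cases h12 : PySem.Str.isIn "json parse" blob <;> simp only [if_true, if_false, Bool.false_eq_true]
    cases h13 : PySem.Str.isIn "jsondecode" blob <;> simp only [if_true, if_false, Bool.false_eq_true]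
    cases h14 : PySem.Str.isIn "model call or json parse failed" blob <;> simp only [if_true, if_false, Bool.false_eq_true]
    cases h15 : PySem.Str.isIn "model call failed" blob <;> simp only [if_true, if_false, Bool.false_eq_true]
    cases h16 : PySem.Str.isIn "llm call failure" blob <;> simp only [if_true, if_false, Bool.false_eq_true]
    cases h17 : PySem.Str.isIn "llm invocation" blob <;> simp only [if_true, if_false, Bool.false_eq_true]
    cases h18 : PySem.Str.isIn "api error" blob <;> simp only [if_true, if_false, Bool.false_eq_true]
    cases h19 : PySem.Str.isIn "overloaded" blob <;> simp only [if_true, if_false, Bool.false_eq_true]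
    cases h20 : PySem.Str.isIn "max token" blob <;> simp only [if_true, if_false, Bool.false_eq_true]
    cases h21 : PySem.Str.isIn "token limit" blob <;> simp only [if_true, if_false, Bool.false_eq_true]
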